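-- pv_equiv track=rewrite | github.com/overwhelmerrr/skoltech_re | task_2/additional_functions.py | build_complement_graph
-- ===== SOURCE A (Python) =====
-- def build_complement_graph(adjacency_dict):
--     """
--     function createg completment graph for given graph
--     adjacency_dict should be dict like {'A':['B'], 'B':['A'], 'C':[]}
--     """
--
--     complement_graph = {}
--
--     for vertex in adjacency_dict:
--         complement_graph[vertex] = []
--
--     for vertex, neighbors in adjacency_dict.items():
--         for other_vertex in adjacency_dict:
--             if vertex != other_vertex and other_vertex not in neighbors:
--                 complement_graph[vertex].append(other_vertex)
--
--     return complement_graph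
-- ===== SOURCE B (Python) =====
-- def build_complement_graph(adjacency_dict):
--     vertices = list(adjacency_dict)
--     complement = {}
--     for v, nbrs in adjacency_dict.items():
--         row = list(vertices)
--         row.remove(v)
--         for n in nbrs:
--             if n in row:
--                 row.remove(n)
--         complement[v] = row
--     return complement
-- ===== Notes on version B (the rewrite author's own statement) =====
-- stated objective: alternative
-- what changed: A fills each complement row incrementally by testing every ordered vertex pair for non-adjacency; B makes one pass that copies the full vertex list per vertex, deletes the vertex and each real neighbour from that local row by first-occurrence removal, and stores the finished row once (complete row minus edges instead of pairwise inclusion).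
import Mathlib
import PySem

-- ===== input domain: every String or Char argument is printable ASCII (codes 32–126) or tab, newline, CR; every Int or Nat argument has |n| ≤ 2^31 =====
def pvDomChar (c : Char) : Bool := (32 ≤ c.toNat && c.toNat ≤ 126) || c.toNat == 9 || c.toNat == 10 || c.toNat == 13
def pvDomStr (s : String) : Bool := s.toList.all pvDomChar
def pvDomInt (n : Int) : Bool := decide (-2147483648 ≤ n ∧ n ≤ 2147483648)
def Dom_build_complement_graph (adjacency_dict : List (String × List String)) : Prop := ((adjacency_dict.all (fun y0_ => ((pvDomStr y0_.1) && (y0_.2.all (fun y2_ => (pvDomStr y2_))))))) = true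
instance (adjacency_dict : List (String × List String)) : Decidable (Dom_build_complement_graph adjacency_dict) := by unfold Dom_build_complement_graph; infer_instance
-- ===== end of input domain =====

-- B replaces A's pairwise non-adjacency test (nested loops appending into dict rows) by one pass
-- that builds each row locally: copy the vertex list, delete the vertex and each real neighbour by
-- first-occurrence removal, store the finished row once.  Alternative decomposition, same cost.

-- ===== PORT A =====
def build_complement_graph (adjacency_dict : List (String × List String)) : List (String × List String) :=
  -- complement_graph = {}; for vertex in adjacency_dict: complement_graph[vertex] = []
  let complement0 : PySem.Dict String (List String) :=
    adjacency_dict.foldl (fun d p => d.insert p.1 []) PySem.Dict.empty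
  -- for vertex, neighbors in adjacency_dict.items():
  --   for other_vertex in adjacency_dict:
  --     if vertex != other_vertex and other_vertex not in neighbors: complement_graph[vertex].append(other_vertex)
  let complement1 : PySem.Dict String (List String) :=
    adjacency_dict.foldl (fun d p =>
      (adjacency_dict.map Prod.fst).foldl (fun d u =>
        if p.1 ≠ u ∧ ¬ (u ∈ p.2) then d.modify p.1 [] (fun row => row ++ [u]) else d) d) complement0
  complement1.items

-- ===== PORT B =====
def build_complement_graph_alt (adjacency_dict : List (String × List String)) : List (String × List String) :=
  -- vertices = list(adjacency_dict)
  let vertices := adjacency_dict.map Prod.fst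
  -- complement = {}
  -- for v, nbrs in adjacency_dict.items():
  --   row = list(vertices); row.remove(v)        -- v is a key, hence present in vertices, so
  --                                              -- remove = first-occurrence erase, exact here
  --                                              -- (PySem.List.remove?_eq_some_erase)
  --   for n in nbrs:
  --     if n in row: row.remove(n)               -- guarded remove of a present element = erase
  --   complement[v] = row
  let complement : PySem.Dict String (List String) :=
    adjacency_dict.foldl (fun d p =>
      let row0 := vertices.erase p.1
      let row := p.2.foldl (fun row n => if n ∈ row then row.erase n else row) row0
      d.insert p.1 row) PySem.Dict.empty
  complement.items

-- ===== PRECONDITION & SPEC =====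
-- Pre_ requires pairwise-distinct keys: the association list stands for A's Python dict argument,
-- whose keys are necessarily distinct, so duplicate-key lists represent no actual input of A.
def Pre_build_complement_graph (adjacency_dict : List (String × List String)) : Prop :=
  (adjacency_dict.map Prod.fst).Nodup
instance (adjacency_dict : List (String × List String)) : Decidable (Pre_build_complement_graph adjacency_dict) := by unfold Pre_build_complement_graph; infer_instance

def pvWitness_build_complement_graph : (List (String × List String)) :=
  [("A", ["B"]), ("B", ["A"]), ("C", [])]

def Spec_build_complement_graph (adjacency_dict : List (String × List String)) (out : List (String × List String)) : Prop := out = build_complement_graph_alt adjacency_dict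
instance (adjacency_dict : List (String × List String)) (out : List (String × List String)) : Decidable (Spec_build_complement_graph adjacency_dict out) := by unfold Spec_build_complement_graph; infer_instance

-- ===== CLAIM (what is proved, stated in full; the proofs are below) =====
def Claim_equal_build_complement_graph : Prop := ∀ (adjacency_dict : List (String × List String)), Dom_build_complement_graph adjacency_dict → Pre_build_complement_graph adjacency_dict → Spec_build_complement_graph adjacency_dict (build_complement_graph adjacency_dict)

-- ===== LEMMAS AND PROOFS =====

-- A dict with distinct keys is the key-ordered list of its bindings.
theorem pvItems_eq_map_keys (d : PySem.Dict String (List String)) (h : d.keys.Nodup) :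
    d.items = d.keys.map (fun k => (k, d.getD k [])) := by
  simp only [PySem.Dict.keys, List.map_map]
  have h2 : ∀ p ∈ d.items, ((fun k => (k, d.getD k [])) ∘ Prod.fst) p = id p := by
    intro p hp
    have hv : d.getD p.1 [] = p.2 :=
      PySem.Dict.getD_of_mem_items d (k := p.1) (v := p.2) (by simpa using hp) h []
    obtain ⟨a, b⟩ := p
    simpa using hv
  rw [List.map_congr_left h2, List.map_id]

-- A's inner loop: getD after appending every admissible vertex into row `v`.
theorem pvInnerA (ks : List String) (v : String) (nbrs : List String)
    (d : PySem.Dict String (List String)) (w : String) :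
    (ks.foldl (fun d u => if v ≠ u ∧ ¬ (u ∈ nbrs) then d.modify v [] (fun row => row ++ [u]) else d) d).getD w []
      = if w = v then d.getD v [] ++ ks.filter (fun u => decide (v ≠ u ∧ ¬ (u ∈ nbrs)))
        else d.getD w [] := by
  induction ks generalizing d with
  | nil =>
    simp only [List.foldl_nil, List.filter_nil, List.append_nil]
    split_ifs with hw
    · rw [hw]
    · rfl
  | cons u ks ih =>
    simp only [List.foldl_cons]
    by_cases hc : v ≠ u ∧ ¬ (u ∈ nbrs)
    · rw [if_pos hc, ih]
      by_cases hw : w = v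
      · subst hw
        rw [if_pos rfl, if_pos rfl, PySem.Dict.getD_modify_self]
        simp [hc]
      · rw [if_neg hw, if_neg hw, PySem.Dict.getD_modify_of_ne _ _ _ hw]
    · rw [if_neg hc, ih]
      simp [hc]

theorem pvInnerA_keys (ks : List String) (v : String) (nbrs : List String)
    (d : PySem.Dict String (List String)) (hv : v ∈ d.keys) :
    (ks.foldl (fun d u => if v ≠ u ∧ ¬ (u ∈ nbrs) then d.modify v [] (fun row => row ++ [u]) else d) d).keys
      = d.keys := by
  induction ks generalizing d with
  | nil => simp
  | cons u ks ih =>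
    simp only [List.foldl_cons]
    by_cases hc : v ≠ u ∧ ¬ (u ∈ nbrs)
    · rw [if_pos hc]
      have hk : (d.modify v [] (fun row => row ++ [u])).keys = d.keys := by
        rw [PySem.Dict.keys_modify,
          PySem.Dict.keys_insert_of_contains _ _ ((PySem.Dict.contains_iff_mem_keys d v).mpr hv)]
      rw [ih _ (by rw [hk]; exact hv), hk]
    · rw [if_neg hc, ih _ hv]

-- A's outer loop: each key's row is produced by the unique item carrying that key.
theorem pvOuterA (adj' : List (String × List String)) (ks : List String)
    (d : PySem.Dict String (List String)) (w : String)
    (hn : (adj'.map Prod.fst).Nodup) :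
    (adj'.foldl (fun d p =>
        ks.foldl (fun d u => if p.1 ≠ u ∧ ¬ (u ∈ p.2) then d.modify p.1 [] (fun row => row ++ [u]) else d) d) d).getD w []
      = match adj'.find? (fun p => p.1 == w) with
        | some p => d.getD w [] ++ ks.filter (fun u => decide (p.1 ≠ u ∧ ¬ (u ∈ p.2)))
        | none => d.getD w [] := by
  induction adj' generalizing d with
  | nil => simp
  | cons p rest ih =>
    have hnr : (rest.map Prod.fst).Nodup := by
      simpa using (List.nodup_cons.mp (by simpa using hn)).2
    simp only [List.foldl_cons]
    rw [ih _ hnr]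
    by_cases hw : p.1 = w
    · have hnone : rest.find? (fun q => q.1 == w) = none := by
        rw [List.find?_eq_none]
        intro q hq
        have : q.1 ∈ rest.map Prod.fst := List.mem_map_of_mem hq
        have hne : q.1 ≠ p.1 := by
          intro e
          exact (List.nodup_cons.mp (by simpa using hn)).1 (e ▸ this)
        simp [hw ▸ hne]
      have hfind : (p :: rest).find? (fun q => q.1 == w) = some p := by
        simp [hw]
      rw [hnone, hfind, pvInnerA, if_pos hw.symm, hw]
      simp [hw]
    · have hfind : (p :: rest).find? (fun q => q.1 == w) = rest.find? (fun q => q.1 == w) := by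
        simp [hw]
      rw [hfind, pvInnerA, if_neg (fun e => hw e.symm)]

theorem pvOuterA_some (adj' : List (String × List String)) (ks : List String)
    (d : PySem.Dict String (List String)) (w : String)
    (hn : (adj'.map Prod.fst).Nodup) (p : String × List String)
    (hfind : adj'.find? (fun p => p.1 == w) = some p) :
    (adj'.foldl (fun d p =>
        ks.foldl (fun d u => if p.1 ≠ u ∧ ¬ (u ∈ p.2) then d.modify p.1 [] (fun row => row ++ [u]) else d) d) d).getD w []
      = d.getD w [] ++ ks.filter (fun u => decide (p.1 ≠ u ∧ ¬ (u ∈ p.2))) := by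
  rw [pvOuterA adj' ks d w hn, hfind]

theorem pvOuterA_keys (adj' : List (String × List String)) (ks : List String)
    (d : PySem.Dict String (List String)) (hp : ∀ p ∈ adj', p.1 ∈ d.keys) :
    (adj'.foldl (fun d p =>
        ks.foldl (fun d u => if p.1 ≠ u ∧ ¬ (u ∈ p.2) then d.modify p.1 [] (fun row => row ++ [u]) else d) d) d).keys
      = d.keys := by
  induction adj' generalizing d with
  | nil => simp
  | cons p rest ih =>
    simp only [List.foldl_cons]
    have hk := pvInnerA_keys ks p.1 p.2 d (hp p (by simp))
    rw [ih _ (fun q hq => by rw [hk]; exact hp q (by simp [hq])), hk]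

-- On a duplicate-free row, guarded first-occurrence removal is set subtraction.
theorem pvEraseFold_eq_filter (ns : List String) (l : List String) (h : l.Nodup) :
    ns.foldl (fun l n => if n ∈ l then l.erase n else l) l
      = l.filter (fun u => decide (¬ (u ∈ ns))) := by
  induction ns generalizing l with
  | nil => simp
  | cons n ns ih =>
    simp only [List.foldl_cons]
    by_cases hn : n ∈ l
    · rw [if_pos hn, ih _ (h.erase n), List.Nodup.erase_eq_filter h, List.filter_filter]
      apply List.filter_congr
      intro u _
      by_cases hun : u = n
      · simp [hun]
      · simp [hun]
    · rw [if_neg hn, ih _ h]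
      apply List.filter_congr
      intro u hu
      have hun : u ≠ n := fun e => hn (e ▸ hu)
      simp [hun]

-- ===== VERDICT (by name: the statement is the Claim_ definition above) =====
theorem build_complement_graph_spec : Claim_equal_build_complement_graph := by
  intro adj _ hpre
  unfold Spec_build_complement_graph build_complement_graph build_complement_graph_alt
  have hk : (adj.map Prod.fst).Nodup := hpre
  -- A's initial dict
  have hIA : (adj.foldl (fun d p => d.insert p.1 ([] : List String)) PySem.Dict.empty).items
      = adj.map (fun p => (p.1, ([] : List String))) := by
    simpa using PySem.Dict.items_foldl_insert_fresh adj Prod.fst (fun _ => []) PySem.Dict.empty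
      (fun a _ => PySem.Dict.contains_empty _) hk
  have hKA : (adj.foldl (fun d p => d.insert p.1 ([] : List String)) PySem.Dict.empty).keys
      = adj.map Prod.fst := by
    simp [PySem.Dict.keys, hIA]
  -- B's dict is built by inserting each fresh key once with its finished row
  have hIB : (adj.foldl (fun d p =>
        d.insert p.1 (p.2.foldl (fun row n => if n ∈ row then row.erase n else row)
          ((adj.map Prod.fst).erase p.1))) PySem.Dict.empty).items
      = adj.map (fun p => (p.1, p.2.foldl (fun row n => if n ∈ row then row.erase n else row)
          ((adj.map Prod.fst).erase p.1))) := by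
    simpa using PySem.Dict.items_foldl_insert_fresh adj Prod.fst
      (fun p => p.2.foldl (fun row n => if n ∈ row then row.erase n else row)
        ((adj.map Prod.fst).erase p.1)) PySem.Dict.empty
      (fun a _ => PySem.Dict.contains_empty _) hk
  have hKFA := pvOuterA_keys adj (adj.map Prod.fst) _
    (fun p hp => by rw [hKA]; exact List.mem_map_of_mem hp)
  rw [pvItems_eq_map_keys _ (by rw [hKFA, hKA]; exact hk), hKFA, hKA, hIB, List.map_map]
  apply List.map_congr_left
  intro p hp
  simp only [Function.comp_apply]
  -- the unique item of adj carrying key p.1 is p itself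
  have hfind : adj.find? (fun q => q.1 == p.1) = some p := by
    rcases (List.find?_isSome.mpr ⟨p, hp, by simp⟩ : (adj.find? (fun q => q.1 == p.1)).isSome)
      |> Option.isSome_iff_exists.mp with ⟨q, hq⟩
    have hq1 : q.1 = p.1 := by simpa using List.find?_some hq
    have hqmem : q ∈ adj := List.mem_of_find?_eq_some hq
    rw [hq, List.inj_on_of_nodup_map hk hqmem hp hq1]
  have hgA : (adj.foldl (fun d p => d.insert p.1 ([] : List String)) PySem.Dict.empty).getD p.1 [] = [] := by
    refine PySem.Dict.getD_of_mem_items _ ?_ (by rw [hKA]; exact hk) []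
    rw [hIA]; exact List.mem_map.mpr ⟨p, hp, rfl⟩
  rw [pvOuterA_some adj (adj.map Prod.fst) _ p.1 hk p hfind, hgA, List.nil_append,
      pvEraseFold_eq_filter _ _ (hk.erase _), List.Nodup.erase_eq_filter hk, List.filter_filter]
  refine congrArg (Prod.mk p.1) ?_
  apply List.filter_congr
  intro u _
  by_cases h1 : u = p.1
  · simp [h1]
  · by_cases h2 : u ∈ p.2 <;> simp [h2, h1, Ne.symm h1]
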